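-- pv_equiv track=rewrite | github.com/Aakarshkumar612/CPA-Ai-AGENT | agents/analysis.py | _determine_overall_severity
-- ===== SOURCE A (Python) =====
-- SEVERITY_ORDER = {"low": 0, "medium": 1, "high": 2, "critical": 3}
--
-- def _determine_overall_severity(anomalies: list[tuple[str, str]]) -> str:
--     """
--     Determine the overall severity from all individual anomaly severities.
--
--     The overall severity is the HIGHEST severity among all anomalies.
--     E.g., if you have 2 medium + 1 critical → overall = critical
--
--     Args:
--         anomalies: List of (description, severity) tuples
--
--     Returns:
--         Overall severity string
--     """
--     if not anomalies:
--         return "low"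
--
--     max_severity = "low"
--     for _, severity in anomalies:
--         if SEVERITY_ORDER.get(severity, 0) > SEVERITY_ORDER.get(max_severity, 0):
--             max_severity = severity
--
--     return max_severity
-- ===== SOURCE B (Python) =====
-- def _determine_overall_severity(anomalies: list[tuple[str, str]]) -> str:
--     present = {sev for _, sev in anomalies}
--     for level in ("critical", "high", "medium", "low"):
--         if level in present:
--             return level
--     return "low"
-- ===== Notes on version B (the rewrite author's own statement) =====
-- stated objective: alternative
-- what changed: B builds the set of severities present and walks the fixed priority ladder critical>high>medium>low returning the first level present, instead of A's running-max scan over anomalies with dict-rank comparisons.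
import Mathlib
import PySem

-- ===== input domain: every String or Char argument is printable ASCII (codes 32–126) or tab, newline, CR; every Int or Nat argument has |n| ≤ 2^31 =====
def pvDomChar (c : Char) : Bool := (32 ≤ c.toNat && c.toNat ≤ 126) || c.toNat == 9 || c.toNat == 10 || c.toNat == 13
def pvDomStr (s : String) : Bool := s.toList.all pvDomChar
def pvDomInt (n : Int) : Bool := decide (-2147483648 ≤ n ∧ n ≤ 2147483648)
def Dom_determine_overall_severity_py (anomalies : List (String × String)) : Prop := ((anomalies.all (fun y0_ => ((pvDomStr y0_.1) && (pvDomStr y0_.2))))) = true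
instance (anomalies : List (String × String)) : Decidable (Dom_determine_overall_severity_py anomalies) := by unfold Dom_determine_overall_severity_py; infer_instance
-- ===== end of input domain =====

-- B replaces A's running-max scan by a severity-set plus a descending walk of the fixed priority ladder (alternative decomposition, same cost).

-- ===== PORT A =====
-- SEVERITY_ORDER = {"low": 0, "medium": 1, "high": 2, "critical": 3}
def SEVERITY_ORDER : PySem.Dict String Int :=
  ((((PySem.Dict.empty).insert "low" 0).insert "medium" 1).insert "high" 2).insert "critical" 3

def determine_overall_severity_py (anomalies : List (String × String)) : String :=
  if anomalies = [] then "low"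
  else
    anomalies.foldl
      (fun max_severity p =>
        if SEVERITY_ORDER.getD p.2 0 > SEVERITY_ORDER.getD max_severity 0 then p.2
        else max_severity)
      "low"

-- ===== PORT B =====
def determine_overall_severity_py_alt (anomalies : List (String × String)) : String :=
  let present : PySem.Set String := PySem.Set.ofList (anomalies.map Prod.snd)
  -- 'for level in (...): if level in present: return level' — first-hit loop over the ladder
  match ["critical", "high", "medium", "low"].find? (fun level => PySem.Set.contains present level) with
  | some level => level
  | none => "low"

-- ===== PRECONDITION & SPEC =====
def Spec_determine_overall_severity_py (anomalies : List (String × String)) (out : String) : Prop := out = determine_overall_severity_py_alt anomalies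
instance (anomalies : List (String × String)) (out : String) : Decidable (Spec_determine_overall_severity_py anomalies out) := by unfold Spec_determine_overall_severity_py; infer_instance

-- ===== CLAIM (what is proved, stated in full; the proofs are below) =====
def Claim_equal_determine_overall_severity_py : Prop := ∀ (anomalies : List (String × String)), Dom_determine_overall_severity_py anomalies → Spec_determine_overall_severity_py anomalies (determine_overall_severity_py anomalies)

-- ===== LEMMAS AND PROOFS =====

/-- Rank of a severity string (the SEVERITY_ORDER value, 0 default), as a Nat. -/
def rankS (s : String) : Nat :=
  if s = "critical" then 3 else if s = "high" then 2 else if s = "medium" then 1 else 0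

/-- Canonical name of a rank. -/
def nameR : Nat → String
  | 3 => "critical" | 2 => "high" | 1 => "medium" | _ => "low"

/-- Highest rank among the severities of a list. -/
def maxRank (l : List (String × String)) : Nat :=
  l.foldr (fun p m => max (rankS p.2) m) 0

theorem getD_SEVERITY_ORDER (s : String) : SEVERITY_ORDER.getD s 0 = (rankS s : Int) := by
  simp only [SEVERITY_ORDER, PySem.Dict.getD_insert, PySem.Dict.getD_empty, rankS]
  split_ifs <;> simp

theorem rankS_le_three (s : String) : rankS s ≤ 3 := by
  unfold rankS; split_ifs <;> omega

theorem canon_of_rank_pos (s : String) (h : 0 < rankS s) : nameR (rankS s) = s := by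
  unfold rankS at *
  split_ifs at h ⊢ <;> simp_all [nameR]

theorem maxRank_cons (p : String × String) (l : List (String × String)) :
    maxRank (p :: l) = max (rankS p.2) (maxRank l) := rfl

theorem foldA_eq (l : List (String × String)) (s : String) (hs : nameR (rankS s) = s) :
    l.foldl
      (fun max_severity p =>
        if SEVERITY_ORDER.getD p.2 0 > SEVERITY_ORDER.getD max_severity 0 then p.2
        else max_severity) s
    = nameR (max (rankS s) (maxRank l)) := by
  induction l generalizing s with
  | nil => simpa [maxRank] using hs.symm
  | cons p l ih =>
    rw [List.foldl_cons]
    have hstep : (if SEVERITY_ORDER.getD p.2 0 > SEVERITY_ORDER.getD s 0 then p.2 else s)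
        = if rankS s < rankS p.2 then p.2 else s := by
      simp [getD_SEVERITY_ORDER]
    rw [hstep, maxRank_cons]
    by_cases hlt : rankS s < rankS p.2
    · rw [if_pos hlt, ih p.2 (canon_of_rank_pos _ (by omega))]
      congr 1; omega
    · rw [if_neg hlt, ih s hs]
      congr 1; omega

theorem A_eq_nameR (l : List (String × String)) :
    determine_overall_severity_py l = nameR (maxRank l) := by
  unfold determine_overall_severity_py
  split_ifs with h
  · subst h; rfl
  · have := foldA_eq l "low" (by rfl)
    simpa [rankS] using this

theorem mem_rank_le (l : List (String × String)) (x : String)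
    (hx : x ∈ l.map Prod.snd) : rankS x ≤ maxRank l := by
  induction l with
  | nil => simp at hx
  | cons p l ih =>
    rw [maxRank_cons]
    simp only [List.map_cons, List.mem_cons] at hx
    rcases hx with h | h
    · subst h; omega
    · have := ih h; omega

theorem exists_of_maxRank (l : List (String × String)) (h : 0 < maxRank l) :
    ∃ x ∈ l.map Prod.snd, rankS x = maxRank l := by
  induction l with
  | nil => simp [maxRank] at h
  | cons p l ih =>
    rw [maxRank_cons] at h ⊢
    by_cases hc : maxRank l ≤ rankS p.2
    · exact ⟨p.2, by simp, by omega⟩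
    · obtain ⟨x, hx, hr⟩ := ih (by omega)
      exact ⟨x, by simp [hx], by omega⟩

theorem not_mem_of_rank_gt (l : List (String × String)) (x : String)
    (h : maxRank l < rankS x) :
    x ∉ PySem.Set.ofList (l.map Prod.snd) := by
  rw [PySem.Set.mem_ofList]
  intro hx
  exact absurd (mem_rank_le l x hx) (by omega)

theorem maxRank_le_three (l : List (String × String)) : maxRank l ≤ 3 := by
  by_cases h0 : 0 < maxRank l
  · obtain ⟨x, _, hr⟩ := exists_of_maxRank l h0; rw [← hr]; exact rankS_le_three x
  · omega

theorem mem_canon (l : List (String × String)) (h : 0 < maxRank l) :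
    nameR (maxRank l) ∈ PySem.Set.ofList (l.map Prod.snd) := by
  obtain ⟨x, hx, hr⟩ := exists_of_maxRank l h
  rw [PySem.Set.mem_ofList, ← hr, canon_of_rank_pos x (by omega)]
  exact hx

theorem B_eq_nameR (l : List (String × String)) :
    determine_overall_severity_py_alt l = nameR (maxRank l) := by
  unfold determine_overall_severity_py_alt
  have hub := maxRank_le_three l
  have hr3 : rankS "critical" = 3 := by decide
  have hr2 : rankS "high" = 2 := by decide
  have hr1 : rankS "medium" = 1 := by decide
  set m := maxRank l with hm
  interval_cases m
  · have h3 := not_mem_of_rank_gt l "critical" (by omega)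
    have h2 := not_mem_of_rank_gt l "high" (by omega)
    have h1 := not_mem_of_rank_gt l "medium" (by omega)
    by_cases h0 : "low" ∈ PySem.Set.ofList (l.map Prod.snd) <;>
      simp [List.find?, PySem.Set.contains, h3, h2, h1, h0, nameR]
  · have h3 := not_mem_of_rank_gt l "critical" (by omega)
    have h2 := not_mem_of_rank_gt l "high" (by omega)
    have h1 := mem_canon l (by omega)
    rw [← hm] at h1; simp only [nameR] at h1
    simp [List.find?, PySem.Set.contains, h3, h2, h1, nameR]
  · have h3 := not_mem_of_rank_gt l "critical" (by omega)
    have h2 := mem_canon l (by omega)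
    rw [← hm] at h2; simp only [nameR] at h2
    simp [List.find?, PySem.Set.contains, h3, h2, nameR]
  · have h3 := mem_canon l (by omega)
    rw [← hm] at h3; simp only [nameR] at h3
    simp [List.find?, PySem.Set.contains, h3, nameR]

-- ===== VERDICT (by name: the statement is the Claim_ definition above) =====
theorem determine_overall_severity_py_spec : Claim_equal_determine_overall_severity_py := by
  intro l _
  unfold Spec_determine_overall_severity_py
  rw [A_eq_nameR, B_eq_nameR]
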